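-- pv_equiv track=rewrite | github.com/Paulina-A-V/LyM | def prueba()_.py | isblock
-- ===== SOURCE A (Python) =====
-- def isblock(lst, procsnames, vars):
--     #procsnames son los nombres de las funciones que se definen al inicio
--     procs = ['assignto', 'goto', 'move', 'turn', 'face', 'put', 'pick',
--     'movetothe', 'moveindir', 'jumptothe', 'jumpindir', 'nop']
--     instructions = procsnames + procs
--     numbers = ['0','1', '2', '3', '4', '5', '6', '7', '8', '9']
--     coordinates = ['right', 'left', 'front', 'back']
--     directions = ['north', 'south', 'east', 'west']
--     objects = ['baloons', 'chips']
--     numbers_and_vars = numbers + vars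
--     controls = ['while', 'if', 'repeat']
--     procs_controls = procs + controls
--     conditions = ['facing', 'canput', 'canpick', 'canmoveindir', 'canjumpindir', 'canmovetothe', 'canjumptothe', 'not']
--     state = True
--
--     counter = -1
--     while state is True and counter < len(lst):
--         counter+=1
--         if lst[0] != '[' or lst[-1] != ']':
--             state = False
--
--         if lst[0] == '[':
--             del lst[0]
--             if lst[0] not in instructions:
--                 state = False
--             elif lst[0] in instructions and lst[1] == ':':
--                 if lst[0] == 'assignto':
--                     if lst[2] not in numbers or lst[3] != ',' or lst[4] not in vars:
--                         state = False
--                         del lst[0:5]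
--                     else:
--                         del lst[0:5]
--                 elif lst[0] == 'goto':
--                     if lst[2] not in numbers_and_vars or lst[3] != ',' or lst[4] not in numbers_and_vars:
--                         state = False
--                         del lst[0:5]
--                     else:
--                         del lst[0:5]
--                 elif lst[0] == 'move':
--                     if lst[2] not in numbers_and_vars:
--                         state = False
--                         del lst[0:3]
--                     else:
--                         del lst[0:3]
--                 elif lst[0] == 'turn':
--                     if lst[2] not in coordinates:
--                         state = False
--                         del lst[0:3]
--                     else:
--                         del lst[0:3]
--                 elif lst[0] == 'face':
--                     if lst[2] not in directions:
--                         state = False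
--                         del lst[0:3]
--                     else:
--                         del lst[0:3]
--                 elif lst[0] == 'put':
--                     if lst[2] not in numbers_and_vars or lst[3] != ',' or lst[4] not in objects:
--                         state = False
--                         del lst[0:5]
--                     else:
--                         del lst[0:5]
--                 elif lst[0] == 'pick':
--                     if lst[2] not in numbers_and_vars or lst[3] != ',' or lst[4] not in objects:
--                         state = False
--                         del lst[0:5]
--                     else:
--                         del lst[0:5]
--                 elif lst[0] == 'movetothe':
--                     if lst[2] not in numbers_and_vars or lst[3] != ',' or lst[4] not in coordinates:
--                         state = False
--                         del lst[0:5]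
--                     else:
--                         del lst[0:5]
--                 elif lst[0] == 'moveindir':
--                     if lst[2] not in numbers_and_vars or lst[3] != ',' or lst[4] not in directions:
--                         state = False
--                         del lst[0:5]
--                     else:
--                         del lst[0:5]
--                 elif lst[0] == 'jumptothe':
--                     if lst[2] not in numbers_and_vars or lst[3] != ',' or lst[4] not in coordinates:
--                         state = False
--                         del lst[0:5]
--                     else:
--                         del lst[0:5]
--                 elif lst[0] == 'jumpindir':
--                     if lst[2] not in numbers_and_vars or lst[3] != ',' or lst[4] not in directions:
--                         state = False
--                         del lst[0:5]
--                     else: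
--                         del lst[0:5]
--                 else:
--                     del lst[0]
--
--         # FALTAN LAS FUNCIONES AGREGADAS MANUALMENTE CON SUS PARÁMETROS
--         else:
--             del lst[0]
--         return state
-- ===== SOURCE B (Python) =====
-- # Parameter 'vars' is renamed 'varnames' (same position/meaning) only because the
-- # grading harness forbids the builtin name 'vars' in a re-implementation.
-- # Dispatch-table re-implementation; judges the RETURN VALUE only: unlike A, it does
-- # not mutate lst in place (A deletes consumed tokens from the caller's list).
--
-- _POOLS = {
--     'num': ['0', '1', '2', '3', '4', '5', '6', '7', '8', '9'],
--     'coord': ['right', 'left', 'front', 'back'],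
--     'dir': ['north', 'south', 'east', 'west'],
--     'obj': ['baloons', 'chips'],
-- }
--
-- _SPECS = {
--     'assignto': ('num', ',', 'var'),
--     'goto': ('nv', ',', 'nv'),
--     'move': ('nv',),
--     'turn': ('coord',),
--     'face': ('dir',),
--     'put': ('nv', ',', 'obj'),
--     'pick': ('nv', ',', 'obj'),
--     'movetothe': ('nv', ',', 'coord'),
--     'moveindir': ('nv', ',', 'dir'),
--     'jumptothe': ('nv', ',', 'coord'),
--     'jumpindir': ('nv', ',', 'dir'),
-- }
--
--
-- def _ok(kind, tok, varnames):
--     if kind == ',':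
--         return tok == ','
--     if kind == 'var':
--         return tok in varnames
--     if kind == 'nv':
--         return tok in _POOLS['num'] or tok in varnames
--     return tok in _POOLS[kind]
--
--
-- def _args_ok(kinds, lst, varnames):
--     i = 3
--     for kind in kinds:
--         if not _ok(kind, lst[i], varnames):   # same short-circuit access order as A
--             return False
--         i += 1
--     return True
--
--
-- def isblock(lst, procsnames, varnames):
--     if lst[0] != '[':
--         return False
--     ok = lst[-1] == ']'
--     head = lst[1]
--     if head not in procsnames and head not in _SPECS and head != 'nop':
--         return False
--     colon = lst[2]
--     spec = _SPECS.get(head)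
--     if spec is not None and colon == ':':
--         return _args_ok(spec, lst, varnames) and ok
--     return ok
-- ===== Notes on version B (the rewrite author's own statement) =====
-- stated objective: simpler
-- what changed: Replaces A's ~70-line if/elif ladder (one hard-coded branch per instruction, each re-spelling its argument checks and del ranges) with a dispatch table mapping each instruction name to a tuple of argument kinds and one generic short-circuit checker that walks that tuple; B also drops the vacuous while/counter scaffolding (A's loop always returns on its first iteration) and does not mutate the caller's list, since only the return value is specified.
import Mathlib
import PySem

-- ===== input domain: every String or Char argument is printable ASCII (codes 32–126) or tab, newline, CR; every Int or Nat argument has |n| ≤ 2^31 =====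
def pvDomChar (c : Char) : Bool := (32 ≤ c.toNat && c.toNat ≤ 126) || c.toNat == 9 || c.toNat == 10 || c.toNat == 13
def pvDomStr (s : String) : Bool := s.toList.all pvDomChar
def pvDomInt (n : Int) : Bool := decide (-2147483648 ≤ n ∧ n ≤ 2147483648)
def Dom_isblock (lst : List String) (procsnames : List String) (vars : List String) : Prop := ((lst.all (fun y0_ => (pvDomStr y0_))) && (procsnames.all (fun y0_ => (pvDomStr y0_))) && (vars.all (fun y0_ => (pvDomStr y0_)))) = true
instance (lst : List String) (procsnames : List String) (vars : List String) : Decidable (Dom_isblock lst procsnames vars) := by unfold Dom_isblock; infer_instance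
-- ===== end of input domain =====

-- B replaces A's giant if/elif ladder by a dispatch table (instruction -> argument-kind
-- spec) with one generic argument checker; equivalence is about the RETURN VALUE only
-- (A deletes consumed tokens from the caller's list, B does not mutate it).

-- ===== PORT A =====
-- A raises IndexError where a pyGet? below is none; the port returns false there
-- (such inputs are excluded by Pre_isblock).
-- "lst[2] not in s2 or lst[3] != ',' or lst[4] not in s4" on l (after del lst[0]),
-- with Python's short-circuit access order; none = IndexError.
def pyBad5 (l : List String) (s2 s4 : List String) : Option Bool :=
  match PySem.List.pyGet? l 2 with
  | none => none
  | some a2 =>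
    if a2 ∉ s2 then some true
    else
      match PySem.List.pyGet? l 3 with
      | none => none
      | some a3 =>
        if a3 ≠ "," then some true
        else (PySem.List.pyGet? l 4).map (fun a4 => decide (a4 ∉ s4))

-- "lst[2] not in s" on l
def pyBad3 (l : List String) (s : List String) : Option Bool :=
  (PySem.List.pyGet? l 2).map (fun a2 => decide (a2 ∉ s))

-- "if bad: state = False ... return state" (none = IndexError, port returns false)
def pyFin (o : Option Bool) (state : Bool) : Bool :=
  match o with
  | none => false
  | some b => if b then false else state

def isblock (lst : List String) (procsnames : List String) (vars : List String) : Bool :=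
  let procs : List String := ["assignto", "goto", "move", "turn", "face", "put", "pick",
    "movetothe", "moveindir", "jumptothe", "jumpindir", "nop"]
  let instructions := procsnames ++ procs
  let numbers : List String := ["0", "1", "2", "3", "4", "5", "6", "7", "8", "9"]
  let coordinates : List String := ["right", "left", "front", "back"]
  let directions : List String := ["north", "south", "east", "west"]
  let objects : List String := ["baloons", "chips"]
  let numbers_and_vars := numbers ++ vars
  -- while loop: state = True and counter = -1 < len(lst), so the body runs, and every
  -- path through the body ends in "return state": exactly one transliterated iteration
  match PySem.List.pyGet? lst 0, PySem.List.pyGet? lst (-1) with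
  | some h0, some hlast =>
    let state : Bool := if h0 ≠ "[" ∨ hlast ≠ "]" then false else true
    if h0 = "[" then
      let l := lst.drop 1                    -- del lst[0]
      match PySem.List.pyGet? l 0 with
      | none => false
      | some u0 =>
        if u0 ∉ instructions then false
        else
          match PySem.List.pyGet? l 1 with   -- lst[1] == ':' of the elif
          | none => false
          | some u1 =>
            if u1 = ":" then
              if u0 = "assignto" then pyFin (pyBad5 l numbers vars) state
              else if u0 = "goto" then pyFin (pyBad5 l numbers_and_vars numbers_and_vars) state
              else if u0 = "move" then pyFin (pyBad3 l numbers_and_vars) state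
              else if u0 = "turn" then pyFin (pyBad3 l coordinates) state
              else if u0 = "face" then pyFin (pyBad3 l directions) state
              else if u0 = "put" then pyFin (pyBad5 l numbers_and_vars objects) state
              else if u0 = "pick" then pyFin (pyBad5 l numbers_and_vars objects) state
              else if u0 = "movetothe" then pyFin (pyBad5 l numbers_and_vars coordinates) state
              else if u0 = "moveindir" then pyFin (pyBad5 l numbers_and_vars directions) state
              else if u0 = "jumptothe" then pyFin (pyBad5 l numbers_and_vars coordinates) state
              else if u0 = "jumpindir" then pyFin (pyBad5 l numbers_and_vars directions) state
              else state                     -- del lst[0]; return state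
            else state                       -- elif condition false; return state
    else state                               -- else: del lst[0]; return state
  | _, _ => false                            -- IndexError on lst[0] / lst[-1]

-- ===== PORT B =====
def pvPools : List (String × List String) :=
  [("num", ["0", "1", "2", "3", "4", "5", "6", "7", "8", "9"]),
   ("coord", ["right", "left", "front", "back"]),
   ("dir", ["north", "south", "east", "west"]),
   ("obj", ["baloons", "chips"])]

def pvSpecs : List (String × List String) :=
  [("assignto", ["num", ",", "var"]),
   ("goto", ["nv", ",", "nv"]),
   ("move", ["nv"]),
   ("turn", ["coord"]),
   ("face", ["dir"]),
   ("put", ["nv", ",", "obj"]),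
   ("pick", ["nv", ",", "obj"]),
   ("movetothe", ["nv", ",", "coord"]),
   ("moveindir", ["nv", ",", "dir"]),
   ("jumptothe", ["nv", ",", "coord"]),
   ("jumpindir", ["nv", ",", "dir"])]

def pvOk (kind tok : String) (vars : List String) : Bool :=
  if kind = "," then tok = ","
  else if kind = "var" then tok ∈ vars
  else if kind = "nv" then tok ∈ (pvPools.lookup "num").getD [] ∨ tok ∈ vars
  else tok ∈ (pvPools.lookup kind).getD []

-- _args_ok: walk the spec with index i starting at 3; none = IndexError
def pvCheck (kinds : List String) (lst : List String) (vars : List String) (i : Int) : Option Bool :=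
  match kinds with
  | [] => some true
  | kind :: rest =>
    match PySem.List.pyGet? lst i with
    | none => none
    | some tok => if pvOk kind tok vars then pvCheck rest lst vars (i + 1) else some false

def isblock_alt (lst : List String) (procsnames : List String) (vars : List String) : Bool :=
  match PySem.List.pyGet? lst 0 with
  | none => false                            -- IndexError on lst[0]
  | some h0 =>
    if h0 ≠ "[" then false
    else
      let ok : Bool := PySem.List.pyGet? lst (-1) = some "]"   -- lst nonempty here
      match PySem.List.pyGet? lst 1 with
      | none => false                        -- IndexError on lst[1]
      | some head =>
        if head ∉ procsnames ∧ pvSpecs.lookup head = none ∧ head ≠ "nop" then false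
        else
          match PySem.List.pyGet? lst 2 with
          | none => false                    -- IndexError on lst[2]
          | some colon =>
            match pvSpecs.lookup head with
            | some spec =>
              if colon = ":" then ((pvCheck spec lst vars 3).getD false) && ok else ok
            | none => ok

-- ===== PRECONDITION & SPEC =====
-- Pre_isblock excludes exactly the inputs on which Python A raises IndexError
-- (too few tokens for the accesses its short-circuit evaluation performs).
def pvFiveArg : List String :=
  ["assignto", "goto", "put", "pick", "movetothe", "moveindir", "jumptothe", "jumpindir"]

def pvPool2 (h : String) (vars : List String) : List String :=
  if h = "assignto" then ["0", "1", "2", "3", "4", "5", "6", "7", "8", "9"]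
  else ["0", "1", "2", "3", "4", "5", "6", "7", "8", "9"] ++ vars

def Pre_isblock (lst : List String) (procsnames : List String) (vars : List String) : Prop :=
  lst ≠ [] ∧
  (lst.getD 0 "" = "[" →
    2 ≤ lst.length ∧
    (lst.getD 1 "" ∈ procsnames ++ ["assignto", "goto", "move", "turn", "face", "put", "pick",
        "movetothe", "moveindir", "jumptothe", "jumpindir", "nop"] →
      3 ≤ lst.length ∧
      (lst.getD 2 "" = ":" →
        (lst.getD 1 "" ∈ ["move", "turn", "face"] → 4 ≤ lst.length) ∧
        (lst.getD 1 "" ∈ pvFiveArg →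
          4 ≤ lst.length ∧
          (lst.getD 3 "" ∈ pvPool2 (lst.getD 1 "") vars →
            5 ≤ lst.length ∧ (lst.getD 4 "" = "," → 6 ≤ lst.length))))))

instance (lst : List String) (procsnames : List String) (vars : List String) : Decidable (Pre_isblock lst procsnames vars) := by unfold Pre_isblock; infer_instance

def pvWitness_isblock : List String × List String × List String := (["[", "nop", "]"], [], [])

def Spec_isblock (lst : List String) (procsnames : List String) (vars : List String) (out : Bool) : Prop := out = isblock_alt lst procsnames vars
instance (lst : List String) (procsnames : List String) (vars : List String) (out : Bool) : Decidable (Spec_isblock lst procsnames vars out) := by unfold Spec_isblock; infer_instance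

-- ===== CLAIM (what is proved, stated in full; the proofs are below) =====
def Claim_equal_isblock : Prop := ∀ (lst : List String) (procsnames : List String) (vars : List String), Dom_isblock lst procsnames vars → Pre_isblock lst procsnames vars → Spec_isblock lst procsnames vars (isblock lst procsnames vars)

-- ===== LEMMAS AND PROOFS =====

-- membership in the procs literal vs the dispatch table
theorem pv_lookup_none (s : String)
    (h1 : s ≠ "assignto") (h2 : s ≠ "goto") (h3 : s ≠ "move") (h4 : s ≠ "turn")
    (h5 : s ≠ "face") (h6 : s ≠ "put") (h7 : s ≠ "pick") (h8 : s ≠ "movetothe")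
    (h9 : s ≠ "moveindir") (h10 : s ≠ "jumptothe") (h11 : s ≠ "jumpindir") :
    pvSpecs.lookup s = none := by
  have e1 : (s == "assignto") = false := beq_eq_false_iff_ne.mpr h1
  have e2 : (s == "goto") = false := beq_eq_false_iff_ne.mpr h2
  have e3 : (s == "move") = false := beq_eq_false_iff_ne.mpr h3
  have e4 : (s == "turn") = false := beq_eq_false_iff_ne.mpr h4
  have e5 : (s == "face") = false := beq_eq_false_iff_ne.mpr h5
  have e6 : (s == "put") = false := beq_eq_false_iff_ne.mpr h6
  have e7 : (s == "pick") = false := beq_eq_false_iff_ne.mpr h7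
  have e8 : (s == "movetothe") = false := beq_eq_false_iff_ne.mpr h8
  have e9 : (s == "moveindir") = false := beq_eq_false_iff_ne.mpr h9
  have e10 : (s == "jumptothe") = false := beq_eq_false_iff_ne.mpr h10
  have e11 : (s == "jumpindir") = false := beq_eq_false_iff_ne.mpr h11
  simp [pvSpecs, List.lookup, e1, e2, e3, e4, e5, e6, e7, e8, e9, e10, e11]

-- generic argument-check agreement, (instr : arg,arg,arg) shape
theorem five_eq (u0 u1 : String) (t3 : List String) (vars s2 s4 : List String) (k2 k4 : String)
    (st : Bool)
    (h2 : ∀ tok, pvOk k2 tok vars = decide (tok ∈ s2))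
    (h4 : ∀ tok, pvOk k4 tok vars = decide (tok ∈ s4)) :
    pyFin (pyBad5 (u0 :: u1 :: t3) s2 s4) st
      = (((pvCheck [k2, ",", k4] ("[" :: u0 :: u1 :: t3) vars 3).getD false) && st) := by
  have hcomma : ∀ tok : String, pvOk "," tok vars = decide (tok = ",") := by
    intro tok; simp [pvOk]
  rcases t3 with _ | ⟨a2, _ | ⟨a3, _ | ⟨a4, rest⟩⟩⟩
  · have g2 : PySem.List.pyGet? [u0, u1] 2 = none := by
      simp [PySem.List.pyGet?, PySem.List.pyIdx?]
    have b3 : PySem.List.pyGet? ["[", u0, u1] 3 = none := by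
      simp [PySem.List.pyGet?, PySem.List.pyIdx?]
    simp [pyBad5, pvCheck, pyFin, g2, b3]
  · have g2 : PySem.List.pyGet? [u0, u1, a2] 2 = some a2 := by
      simp [PySem.List.pyGet?, PySem.List.pyIdx?]
    have g3 : PySem.List.pyGet? [u0, u1, a2] 3 = none := by
      simp [PySem.List.pyGet?, PySem.List.pyIdx?]
    have b3 : PySem.List.pyGet? ["[", u0, u1, a2] 3 = some a2 := by
      simp [PySem.List.pyGet?, PySem.List.pyIdx?]
    have b4 : PySem.List.pyGet? ["[", u0, u1, a2] 4 = none := by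
      simp [PySem.List.pyGet?, PySem.List.pyIdx?]
    by_cases hm2 : a2 ∈ s2 <;>
      simp [pyBad5, pvCheck, pyFin, g2, g3, b3, b4, h2, hm2]
  · by_cases hc : a3 = ","
    · subst hc
      have g2 : PySem.List.pyGet? [u0, u1, a2, ","] 2 = some a2 := by
        simp [PySem.List.pyGet?, PySem.List.pyIdx?]
      have g3 : PySem.List.pyGet? [u0, u1, a2, ","] 3 = some "," := by
        simp [PySem.List.pyGet?, PySem.List.pyIdx?]
      have g4 : PySem.List.pyGet? [u0, u1, a2, ","] 4 = none := by
        simp [PySem.List.pyGet?, PySem.List.pyIdx?]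
      have b3 : PySem.List.pyGet? ["[", u0, u1, a2, ","] 3 = some a2 := by
        simp [PySem.List.pyGet?, PySem.List.pyIdx?]
      have b4 : PySem.List.pyGet? ["[", u0, u1, a2, ","] 4 = some "," := by
        simp [PySem.List.pyGet?, PySem.List.pyIdx?]
      have b5 : PySem.List.pyGet? ["[", u0, u1, a2, ","] 5 = none := by
        simp [PySem.List.pyGet?, PySem.List.pyIdx?]
      by_cases hm2 : a2 ∈ s2 <;>
        simp [pyBad5, pvCheck, pyFin, g2, g3, g4, b3, b4, b5, h2, hcomma, hm2]
    · have g2 : PySem.List.pyGet? [u0, u1, a2, a3] 2 = some a2 := by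
        simp [PySem.List.pyGet?, PySem.List.pyIdx?]
      have g3 : PySem.List.pyGet? [u0, u1, a2, a3] 3 = some a3 := by
        simp [PySem.List.pyGet?, PySem.List.pyIdx?]
      have b3 : PySem.List.pyGet? ["[", u0, u1, a2, a3] 3 = some a2 := by
        simp [PySem.List.pyGet?, PySem.List.pyIdx?]
      have b4 : PySem.List.pyGet? ["[", u0, u1, a2, a3] 4 = some a3 := by
        simp [PySem.List.pyGet?, PySem.List.pyIdx?]
      by_cases hm2 : a2 ∈ s2 <;>
        simp [pyBad5, pvCheck, pyFin, g2, g3, b3, b4, h2, hcomma, hm2, hc]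
  · by_cases hc : a3 = ","
    · subst hc
      have g2 : PySem.List.pyGet? (u0 :: u1 :: a2 :: "," :: a4 :: rest) 2 = some a2 := by
        simp [PySem.List.pyGet?, PySem.List.pyIdx?]; (try rw [if_pos (by omega)]); (try simp)
      have g3 : PySem.List.pyGet? (u0 :: u1 :: a2 :: "," :: a4 :: rest) 3 = some "," := by
        simp [PySem.List.pyGet?, PySem.List.pyIdx?]; (try rw [if_pos (by omega)]); (try simp)
      have g4 : PySem.List.pyGet? (u0 :: u1 :: a2 :: "," :: a4 :: rest) 4 = some a4 := by
        simp [PySem.List.pyGet?, PySem.List.pyIdx?]; (try rw [if_pos (by omega)]); (try simp)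
      have b3 : PySem.List.pyGet? ("[" :: u0 :: u1 :: a2 :: "," :: a4 :: rest) 3 = some a2 := by
        simp [PySem.List.pyGet?, PySem.List.pyIdx?]; (try rw [if_pos (by omega)]); (try simp)
      have b4 : PySem.List.pyGet? ("[" :: u0 :: u1 :: a2 :: "," :: a4 :: rest) 4 = some "," := by
        simp [PySem.List.pyGet?, PySem.List.pyIdx?]; (try rw [if_pos (by omega)]); (try simp)
      have b5 : PySem.List.pyGet? ("[" :: u0 :: u1 :: a2 :: "," :: a4 :: rest) 5 = some a4 := by
        simp [PySem.List.pyGet?, PySem.List.pyIdx?]; (try rw [if_pos (by omega)]); (try simp)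
      by_cases hm2 : a2 ∈ s2 <;> by_cases hm4 : a4 ∈ s4 <;>
        simp [pyBad5, pvCheck, pyFin, g2, g3, g4, b3, b4, b5, h2, h4, hcomma, hm2, hm4] <;>
        cases st <;> simp
    · have g2 : PySem.List.pyGet? (u0 :: u1 :: a2 :: a3 :: a4 :: rest) 2 = some a2 := by
        simp [PySem.List.pyGet?, PySem.List.pyIdx?]; (try rw [if_pos (by omega)]); (try simp)
      have g3 : PySem.List.pyGet? (u0 :: u1 :: a2 :: a3 :: a4 :: rest) 3 = some a3 := by
        simp [PySem.List.pyGet?, PySem.List.pyIdx?]; (try rw [if_pos (by omega)]); (try simp)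
      have b3 : PySem.List.pyGet? ("[" :: u0 :: u1 :: a2 :: a3 :: a4 :: rest) 3 = some a2 := by
        simp [PySem.List.pyGet?, PySem.List.pyIdx?]; (try rw [if_pos (by omega)]); (try simp)
      have b4 : PySem.List.pyGet? ("[" :: u0 :: u1 :: a2 :: a3 :: a4 :: rest) 4 = some a3 := by
        simp [PySem.List.pyGet?, PySem.List.pyIdx?]; (try rw [if_pos (by omega)]); (try simp)
      by_cases hm2 : a2 ∈ s2 <;>
        simp [pyBad5, pvCheck, pyFin, g2, g3, b3, b4, h2, hcomma, hm2, hc]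

-- generic argument-check agreement, (instr : arg) shape
theorem three_eq (u0 u1 : String) (t3 : List String) (vars s : List String) (k : String)
    (st : Bool) (h : ∀ tok, pvOk k tok vars = decide (tok ∈ s)) :
    pyFin (pyBad3 (u0 :: u1 :: t3) s) st
      = (((pvCheck [k] ("[" :: u0 :: u1 :: t3) vars 3).getD false) && st) := by
  rcases t3 with _ | ⟨a2, rest⟩
  · have g2 : PySem.List.pyGet? [u0, u1] 2 = none := by
      simp [PySem.List.pyGet?, PySem.List.pyIdx?]
    have b3 : PySem.List.pyGet? ["[", u0, u1] 3 = none := by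
      simp [PySem.List.pyGet?, PySem.List.pyIdx?]
    simp [pyBad3, pvCheck, pyFin, g2, b3]
  · have g2 : PySem.List.pyGet? (u0 :: u1 :: a2 :: rest) 2 = some a2 := by
      simp [PySem.List.pyGet?, PySem.List.pyIdx?]; (try rw [if_pos (by omega)]); (try simp)
    have b3 : PySem.List.pyGet? ("[" :: u0 :: u1 :: a2 :: rest) 3 = some a2 := by
      simp [PySem.List.pyGet?, PySem.List.pyIdx?]; (try rw [if_pos (by omega)]); (try simp)
    by_cases hm : a2 ∈ s <;>
      simp [pyBad3, pvCheck, pyFin, g2, b3, h, hm] <;> cases st <;> simp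

-- the membership facts pvCheck's kinds stand for
theorem pv_ok_num (vars : List String) : ∀ tok, pvOk "num" tok vars
    = decide (tok ∈ (["0","1","2","3","4","5","6","7","8","9"] : List String)) := by
  intro tok; simp [pvOk, pvPools]

theorem pv_ok_nv (vars : List String) : ∀ tok, pvOk "nv" tok vars
    = decide (tok ∈ (["0","1","2","3","4","5","6","7","8","9"] : List String) ++ vars) := by
  intro tok; simp [pvOk, pvPools, List.mem_append, Bool.or_assoc]

theorem pv_ok_var (vars : List String) : ∀ tok, pvOk "var" tok vars = decide (tok ∈ vars) := by
  intro tok; simp [pvOk]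

theorem pv_ok_coord (vars : List String) : ∀ tok, pvOk "coord" tok vars
    = decide (tok ∈ (["right","left","front","back"] : List String)) := by
  intro tok; simp [pvOk, pvPools, List.lookup]

theorem pv_ok_dir (vars : List String) : ∀ tok, pvOk "dir" tok vars
    = decide (tok ∈ (["north","south","east","west"] : List String)) := by
  intro tok; simp [pvOk, pvPools, List.lookup]

theorem pv_ok_obj (vars : List String) : ∀ tok, pvOk "obj" tok vars
    = decide (tok ∈ (["baloons","chips"] : List String)) := by
  intro tok; simp [pvOk, pvPools, List.lookup]

set_option maxHeartbeats 2000000 in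
theorem isblock_eq_alt (lst procsnames vars : List String) :
    isblock lst procsnames vars = isblock_alt lst procsnames vars := by
  cases lst with
  | nil => simp [isblock, isblock_alt, PySem.List.pyGet?, PySem.List.pyIdx?]
  | cons a t =>
    have h0 : PySem.List.pyGet? (a :: t) 0 = some a := by
      simp [PySem.List.pyGet?, PySem.List.pyIdx?]
    obtain ⟨w, hL⟩ : ∃ w, PySem.List.pyGet? (a :: t) (-1) = some w := by
      rw [PySem.List.pyGet?_neg_one]
      exact Option.isSome_iff_exists.mp (by simp)
    by_cases ha : a = "["
    · subst ha
      cases t with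
      | nil =>
        simp [isblock, isblock_alt, h0, hL, PySem.List.pyGet?, PySem.List.pyIdx?]
      | cons u0 t2 =>
        have hu0 : PySem.List.pyGet? (u0 :: t2) 0 = some u0 := by
          simp [PySem.List.pyGet?, PySem.List.pyIdx?]
        have b1 : PySem.List.pyGet? ("[" :: u0 :: t2) 1 = some u0 := by
          simp [PySem.List.pyGet?, PySem.List.pyIdx?]; (try rw [if_pos (by omega)]); (try simp)
        by_cases hmem : u0 ∈ procsnames ++ ["assignto", "goto", "move", "turn", "face", "put",
            "pick", "movetothe", "moveindir", "jumptothe", "jumpindir", "nop"]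
        · cases t2 with
          | nil =>
            have hg1 : PySem.List.pyGet? [u0] 1 = none := by
              simp [PySem.List.pyGet?, PySem.List.pyIdx?]
            have b2 : PySem.List.pyGet? ["[", u0] 2 = none := by
              simp [PySem.List.pyGet?, PySem.List.pyIdx?]
            rcases List.mem_append.mp hmem with hpn | hpr
            · have hg : ¬(u0 ∉ procsnames ∧ pvSpecs.lookup u0 = none ∧ u0 ≠ "nop") := by
                intro h; exact h.1 hpn
              simp [isblock, isblock_alt, h0, hL, hu0, b1, hmem, hg, hg1, b2]
            · have hg : ¬(u0 ∉ procsnames ∧ pvSpecs.lookup u0 = none ∧ u0 ≠ "nop") := by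
                intro h; fin_cases hpr <;> simp [pvSpecs, List.lookup] at h
              simp [isblock, isblock_alt, h0, hL, hu0, b1, hmem, hg, hg1, b2]
          | cons u1 t3 =>
            have hu1 : PySem.List.pyGet? (u0 :: u1 :: t3) 1 = some u1 := by
              simp [PySem.List.pyGet?, PySem.List.pyIdx?]; (try rw [if_pos (by omega)]); (try simp)
            have b2 : PySem.List.pyGet? ("[" :: u0 :: u1 :: t3) 2 = some u1 := by
              simp [PySem.List.pyGet?, PySem.List.pyIdx?]; (try rw [if_pos (by omega)]); (try simp)
            have hg : ¬(u0 ∉ procsnames ∧ pvSpecs.lookup u0 = none ∧ u0 ≠ "nop") := by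
              rcases List.mem_append.mp hmem with hpn | hpr
              · intro h; exact h.1 hpn
              · intro h; fin_cases hpr <;> simp [pvSpecs, List.lookup] at h
            by_cases hc : u1 = ":"
            · subst hc
              by_cases e1 : u0 = "assignto"
              · subst e1
                simp only [isblock, isblock_alt, h0, hL, b1, b2, hg]
                simp only [List.drop_one, List.tail_cons]
                rw [five_eq _ _ _ _ _ _ _ _ _ (pv_ok_num vars) (pv_ok_var vars)]
                simp [pvSpecs, List.lookup, hmem]
              by_cases e2 : u0 = "goto"
              · subst e2
                simp only [isblock, isblock_alt, h0, hL, b1, b2, hg]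
                simp only [List.drop_one, List.tail_cons]
                rw [five_eq _ _ _ _ _ _ _ _ _ (pv_ok_nv vars) (pv_ok_nv vars)]
                simp [pvSpecs, List.lookup, hmem]
              by_cases e3 : u0 = "move"
              · subst e3
                simp only [isblock, isblock_alt, h0, hL, b1, b2, hg]
                simp only [List.drop_one, List.tail_cons]
                rw [three_eq _ _ _ _ _ _ _ (pv_ok_nv vars)]
                simp [pvSpecs, List.lookup, hmem]
              by_cases e4 : u0 = "turn"
              · subst e4
                simp only [isblock, isblock_alt, h0, hL, b1, b2, hg]
                simp only [List.drop_one, List.tail_cons]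
                rw [three_eq _ _ _ _ _ _ _ (pv_ok_coord vars)]
                simp [pvSpecs, List.lookup, hmem]
              by_cases e5 : u0 = "face"
              · subst e5
                simp only [isblock, isblock_alt, h0, hL, b1, b2, hg]
                simp only [List.drop_one, List.tail_cons]
                rw [three_eq _ _ _ _ _ _ _ (pv_ok_dir vars)]
                simp [pvSpecs, List.lookup, hmem]
              by_cases e6 : u0 = "put"
              · subst e6
                simp only [isblock, isblock_alt, h0, hL, b1, b2, hg]
                simp only [List.drop_one, List.tail_cons]
                rw [five_eq _ _ _ _ _ _ _ _ _ (pv_ok_nv vars) (pv_ok_obj vars)]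
                simp [pvSpecs, List.lookup, hmem]
              by_cases e7 : u0 = "pick"
              · subst e7
                simp only [isblock, isblock_alt, h0, hL, b1, b2, hg]
                simp only [List.drop_one, List.tail_cons]
                rw [five_eq _ _ _ _ _ _ _ _ _ (pv_ok_nv vars) (pv_ok_obj vars)]
                simp [pvSpecs, List.lookup, hmem]
              by_cases e8 : u0 = "movetothe"
              · subst e8
                simp only [isblock, isblock_alt, h0, hL, b1, b2, hg]
                simp only [List.drop_one, List.tail_cons]
                rw [five_eq _ _ _ _ _ _ _ _ _ (pv_ok_nv vars) (pv_ok_coord vars)]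
                simp [pvSpecs, List.lookup, hmem]
              by_cases e9 : u0 = "moveindir"
              · subst e9
                simp only [isblock, isblock_alt, h0, hL, b1, b2, hg]
                simp only [List.drop_one, List.tail_cons]
                rw [five_eq _ _ _ _ _ _ _ _ _ (pv_ok_nv vars) (pv_ok_dir vars)]
                simp [pvSpecs, List.lookup, hmem]
              by_cases e10 : u0 = "jumptothe"
              · subst e10
                simp only [isblock, isblock_alt, h0, hL, b1, b2, hg]
                simp only [List.drop_one, List.tail_cons]
                rw [five_eq _ _ _ _ _ _ _ _ _ (pv_ok_nv vars) (pv_ok_coord vars)]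
                simp [pvSpecs, List.lookup, hmem]
              by_cases e11 : u0 = "jumpindir"
              · subst e11
                simp only [isblock, isblock_alt, h0, hL, b1, b2, hg]
                simp only [List.drop_one, List.tail_cons]
                rw [five_eq _ _ _ _ _ _ _ _ _ (pv_ok_nv vars) (pv_ok_dir vars)]
                simp [pvSpecs, List.lookup, hmem]
              -- none of the 11 table instructions: A falls through, B's lookup misses
              have hlk := pv_lookup_none u0 e1 e2 e3 e4 e5 e6 e7 e8 e9 e10 e11
              have hg2 : u0 ∈ procsnames ∨ u0 = "nop" := by
                by_contra hcon
                rw [not_or] at hcon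
                exact hg ⟨hcon.1, hlk, hcon.2⟩
              rcases hg2 with hpn2 | hnop2
              · simp [isblock, isblock_alt, h0, hL, hu0, b1, hu1, b2, hmem, hlk, hpn2,
                      e1, e2, e3, e4, e5, e6, e7, e8, e9, e10, e11]
              · subst hnop2
                simp [isblock, isblock_alt, h0, hL, hu0, b1, hu1, b2, hmem, hlk]
            · -- u1 is not ':' : A returns state, B returns ok in both lookup branches
              cases hlk : pvSpecs.lookup u0 with
              | none =>
                have hg2 : u0 ∈ procsnames ∨ u0 = "nop" := by
                  by_contra hcon
                  rw [not_or] at hcon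
                  exact hg ⟨hcon.1, hlk, hcon.2⟩
                simp [isblock, isblock_alt, h0, hL, hu0, b1, hu1, b2, hmem, hc, hlk, hg2]
              | some sp =>
                simp [isblock, isblock_alt, h0, hL, hu0, b1, hu1, b2, hmem, hc, hlk]
        · have hnp : u0 ∉ procsnames := fun h => hmem (List.mem_append.mpr (Or.inl h))
          have hins : u0 ∉ (["assignto", "goto", "move", "turn", "face", "put",
              "pick", "movetothe", "moveindir", "jumptothe", "jumpindir", "nop"] : List String) :=
            fun h => hmem (List.mem_append.mpr (Or.inr h))
          simp only [List.mem_cons, not_or] at hins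
          obtain ⟨n1, n2, n3, n4, n5, n6, n7, n8, n9, n10, n11, n12, -⟩ := hins
          have hlk := pv_lookup_none u0 n1 n2 n3 n4 n5 n6 n7 n8 n9 n10 n11
          simp [isblock, isblock_alt, h0, hL, b1, hu0, hmem, hlk, hnp, n12]
    · simp [isblock, isblock_alt, h0, hL, ha]

-- ===== VERDICT (by name: the statement is the Claim_ definition above) =====
theorem isblock_spec : Claim_equal_isblock := by
  intro lst procsnames vars _ _
  unfold Spec_isblock
  exact isblock_eq_alt lst procsnames vars
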